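-- pv_equiv track=rewrite | github.com/open-compass/VLMEvalKit | vlmeval/dataset/utils/vgrpbench/puzzles/treesandtents.py | check
-- ===== SOURCE A (Python) =====
-- from typing import List, Dict, Any, Tuple
--
-- def check(game_state: Dict[str, Any]) -> bool:
--     board = game_state["board"]
--     size = len(board)
--     # Check tents are not adjacent (including diagonally)
--     for i in range(size):
--         for j in range(size):
--             if board[i][j] == "tt":
--                 for di in [-1, 0, 1]:
--                     for dj in [-1, 0, 1]:
--                         if di == 0 and dj == 0:
--                             continue
--                         ni, nj = i + di, j + dj
--                         if 0 <= ni < size and 0 <= nj < size: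
--                             if board[ni][nj] == "tt":
--                                 return False
--     return True
-- ===== SOURCE B (Python) =====
-- def check(game_state):
--     board = game_state["board"]
--     n = len(board)
--
--     def row_bad(i):
--         # two horizontally adjacent tents inside row i
--         return any(board[i][j] == "tt" and board[i][j + 1] == "tt"
--                    for j in range(n - 1))
--
--     def pair_bad(i):
--         # a tent in row i+1 touching (vertically or diagonally) a tent in row i
--         return any(board[i + 1][j] == "tt" and board[i][j2] == "tt"
--                    for j in range(n)
--                    for j2 in range(max(0, j - 1), min(n, j + 2)))
--
--     return not (any(row_bad(i) for i in range(n))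
--                 or any(pair_bad(i) for i in range(n - 1)))
-- ===== Notes on version B (the rewrite author's own statement) =====
-- stated objective: alternative
-- what changed: B is a two-stage row-sliding-window check: stage 1 scans each row for a horizontally adjacent tent pair, stage 2 scans each pair of consecutive rows for a tent in the lower row touching a tent in the upper row within one column; A instead probes all 8 neighbour offsets of every cell with explicit bounds tests. Pre_ requires a 'board' key (else both raise KeyError) and every row to have at least len(board) cells (else both raise IndexError, except that A can return False early before reaching a short row).
-- outside the precondition, e.g. on check({'board': [['tt', 'ee'], ['tt']]}): A returns False, B raises IndexError
import Mathlib
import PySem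

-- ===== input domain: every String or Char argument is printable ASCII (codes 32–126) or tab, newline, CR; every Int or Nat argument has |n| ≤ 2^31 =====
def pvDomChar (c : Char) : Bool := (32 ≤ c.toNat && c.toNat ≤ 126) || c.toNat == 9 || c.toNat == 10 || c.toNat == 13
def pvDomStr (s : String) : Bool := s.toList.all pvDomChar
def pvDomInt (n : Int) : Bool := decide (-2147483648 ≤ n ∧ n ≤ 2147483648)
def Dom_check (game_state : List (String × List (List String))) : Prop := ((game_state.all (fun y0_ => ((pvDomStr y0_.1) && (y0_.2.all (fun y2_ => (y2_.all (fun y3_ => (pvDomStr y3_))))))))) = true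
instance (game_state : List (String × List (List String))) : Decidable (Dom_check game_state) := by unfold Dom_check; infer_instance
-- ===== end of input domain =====

-- B replaces A's 8-neighbour probe around every cell by a two-stage row-sliding-window
-- scan: horizontal pairs within each row, then touching pairs between consecutive rows
-- (objective: alternative, same cost).

-- game_state["board"] (first-match dict lookup; shared by both ports)
def boardOf (game_state : List (String × List (List String))) : Option (List (List String)) :=
  (PySem.Dict.mk game_state).get? "board"

-- ===== PORT A =====
def check (game_state : List (String × List (List String))) : Bool :=
  match boardOf game_state with
  | none => true   -- Python raises KeyError here; excluded by Pre_check
  | some board =>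
    let size : Int := board.length
    !((PySem.List.pyRange 0 size 1).any fun i =>
      (PySem.List.pyRange 0 size 1).any fun j =>
        (PySem.List.pyGetD (PySem.List.pyGetD board i []) j "" == "tt") &&
        (([-1, 0, 1] : List Int).any fun di =>
          ([-1, 0, 1] : List Int).any fun dj =>
            !(di == 0 && dj == 0) &&
            (let ni := i + di
             let nj := j + dj
             decide (0 ≤ ni) && decide (ni < size) && decide (0 ≤ nj) && decide (nj < size) &&
             (PySem.List.pyGetD (PySem.List.pyGetD board ni []) nj "" == "tt"))))

-- ===== PORT B =====
-- row_bad(i): two horizontally adjacent tents inside row i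
def rowBad (board : List (List String)) (n i : Int) : Bool :=
  (PySem.List.pyRange 0 (n - 1) 1).any fun j =>
    (PySem.List.pyGetD (PySem.List.pyGetD board i []) j "" == "tt") &&
    (PySem.List.pyGetD (PySem.List.pyGetD board i []) (j + 1) "" == "tt")

-- pair_bad(i): a tent in row i+1 touching a tent in row i within one column
def pairBad (board : List (List String)) (n i : Int) : Bool :=
  (PySem.List.pyRange 0 n 1).any fun j =>
    (PySem.List.pyRange (max 0 (j - 1)) (min n (j + 2)) 1).any fun j2 =>
      (PySem.List.pyGetD (PySem.List.pyGetD board (i + 1) []) j "" == "tt") &&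
      (PySem.List.pyGetD (PySem.List.pyGetD board i []) j2 "" == "tt")

def check_alt (game_state : List (String × List (List String))) : Bool :=
  match boardOf game_state with
  | none => true   -- Python raises KeyError here; excluded by Pre_check
  | some board =>
    let n : Int := board.length
    !(((PySem.List.pyRange 0 n 1).any fun i => rowBad board n i) ||
      ((PySem.List.pyRange 0 (n - 1) 1).any fun i => pairBad board n i))

-- ===== PRECONDITION & SPEC =====
-- Pre_check: the dict has a "board" entry and every row has at least len(board) cells.
-- Without a "board" key Python A raises KeyError; with a row shorter than len(board) A
-- raises IndexError, except when it happens to return False before reaching the short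
-- row — those accidental early returns are the only returning inputs excluded.
def Pre_check (game_state : List (String × List (List String))) : Prop :=
  (match boardOf game_state with
   | none => false
   | some board => board.all fun row => decide (board.length ≤ row.length)) = true
instance (game_state : List (String × List (List String))) : Decidable (Pre_check game_state) := by
  unfold Pre_check; infer_instance

def pvWitness_check : (List (String × List (List String))) :=
  [("board", [["tt", "ee"], ["ee", "ee"]])]

def Spec_check (game_state : List (String × List (List String))) (out : Bool) : Prop := out = check_alt game_state
instance (game_state : List (String × List (List String))) (out : Bool) : Decidable (Spec_check game_state out) := by unfold Spec_check; infer_instance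

-- ===== CLAIM (what is proved, stated in full; the proofs are below) =====
def Claim_equal_check : Prop := ∀ (game_state : List (String × List (List String))), Dom_check game_state → Pre_check game_state → Spec_check game_state (check game_state)

-- ===== LEMMAS AND PROOFS =====

-- an in-bounds tent at integer coordinates (i, j) of the board
def Tent (board : List (List String)) (i j : Int) : Prop :=
  0 ≤ i ∧ i < (board.length : Int) ∧ 0 ≤ j ∧ j < (board.length : Int) ∧
    PySem.List.pyGetD (PySem.List.pyGetD board i []) j "" = "tt"

-- a pair of adjacent in-bounds tents exists
def Viol (board : List (List String)) : Prop :=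
  ∃ i j di dj : Int, Tent board i j ∧
    (di = -1 ∨ di = 0 ∨ di = 1) ∧ (dj = -1 ∨ dj = 0 ∨ dj = 1) ∧ ¬(di = 0 ∧ dj = 0) ∧
    Tent board (i + di) (j + dj)

theorem checkA_iff (gs : List (String × List (List String))) (board : List (List String))
    (hb : boardOf gs = some board) :
    check gs = true ↔ ¬ Viol board := by
  unfold check
  rw [hb]
  simp only [Bool.not_eq_true', Bool.eq_false_iff, Ne, List.any_eq_true,
    PySem.List.mem_pyRange_one, List.mem_cons, List.not_mem_nil, or_false,
    Bool.and_eq_true, beq_iff_eq, decide_eq_true_eq]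
  unfold Viol Tent
  constructor <;> intro h hv <;> apply h
  · obtain ⟨i, j, di, dj, ⟨hi0, hi1, hj0, hj1, hc⟩, hdi, hdj, hnz, n0, n1, n2, n3, nc⟩ := hv
    exact ⟨i, ⟨hi0, hi1⟩, j, ⟨hj0, hj1⟩, hc, di, hdi, dj, hdj, hnz, ⟨⟨⟨n0, n1⟩, n2⟩, n3⟩, nc⟩
  · obtain ⟨i, hi, j, hj, hc, di, hdi, dj, hdj, hnz, ⟨⟨⟨n0, n1⟩, n2⟩, n3⟩, nc⟩ := hv
    exact ⟨i, j, di, dj, ⟨hi.1, hi.2, hj.1, hj.2, hc⟩, hdi, hdj, hnz, n0, n1, n2, n3, nc⟩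

-- the two-stage scan finds a violation iff an adjacent tent pair exists
theorem stages_iff_viol (board : List (List String)) :
    ((∃ i, (0 ≤ i ∧ i < (board.length : Int)) ∧ ∃ j,
        (0 ≤ j ∧ j < (board.length : Int) - 1) ∧
        Tent board i j ∧ Tent board i (j + 1)) ∨
     (∃ i, (0 ≤ i ∧ i < (board.length : Int) - 1) ∧ ∃ j,
        (0 ≤ j ∧ j < (board.length : Int)) ∧ ∃ j2,
        (max 0 (j - 1) ≤ j2 ∧ j2 < min (board.length : Int) (j + 2)) ∧
        Tent board (i + 1) j ∧ Tent board i j2)) ↔ Viol board := by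
  unfold Viol
  constructor
  · rintro (⟨i, hi, j, hj, h1, h2⟩ | ⟨i, hi, j, hj, j2, hj2, h1, h2⟩)
    · exact ⟨i, j, 0, 1, h1, by omega, by omega, by omega, by simpa using h2⟩
    · refine ⟨i + 1, j, -1, j2 - j, h1, by omega, by omega, by omega, ?_⟩
      have e1 : i + 1 + -1 = i := by ring
      have e2 : j + (j2 - j) = j2 := by ring
      rw [e1, e2]; exact h2
  · rintro ⟨i, j, di, dj, ht, hdi, hdj, hnz, hnt⟩
    have hb1 := ht.1; have hb2 := ht.2.1; have hb3 := ht.2.2.1; have hb4 := ht.2.2.2.1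
    have hn1 := hnt.1; have hn2 := hnt.2.1; have hn3 := hnt.2.2.1; have hn4 := hnt.2.2.2.1
    rcases hdi with rfl | rfl | rfl
    · -- other tent is one row above: bottom tent (i, j), top tent (i - 1, j + dj)
      refine Or.inr ⟨i - 1, by omega, j, by omega, j + dj, by omega, ?_, hnt⟩
      have e : i - 1 + 1 = i := by ring
      rw [e]; exact ht
    · -- same row: a horizontal pair
      rcases hdj with rfl | rfl | rfl
      · refine Or.inl ⟨i, by omega, j - 1, by omega, ?_, ?_⟩
        · have e1 : j - 1 = j + -1 := by ring
          have e2 : i = i + 0 := by ring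
          rw [e1, e2]; exact hnt
        · have e : j - 1 + 1 = j := by ring
          rw [e]; exact ht
      · omega
      · exact Or.inl ⟨i, by omega, j, by omega, ht, by simpa using hnt⟩
    · -- other tent is one row below: bottom tent (i + 1, j + dj), top tent (i, j)
      exact Or.inr ⟨i, by omega, j + dj, by omega, j, by omega, hnt, ht⟩

theorem checkB_iff (gs : List (String × List (List String))) (board : List (List String))
    (hb : boardOf gs = some board) :
    check_alt gs = true ↔ ¬ Viol board := by
  unfold check_alt rowBad pairBad
  rw [hb]
  simp only [Bool.not_eq_true', Bool.eq_false_iff, Ne, Bool.or_eq_true,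
    List.any_eq_true, PySem.List.mem_pyRange_one, Bool.and_eq_true, beq_iff_eq]
  rw [← stages_iff_viol board]
  unfold Tent
  constructor <;> intro h hv <;> apply h
  · rcases hv with ⟨i, hi, j, hj, ⟨_, _, _, _, h1⟩, ⟨_, _, _, _, h2⟩⟩ |
      ⟨i, hi, j, hj, j2, hj2, ⟨_, _, _, _, h1⟩, ⟨_, _, _, _, h2⟩⟩
    · exact Or.inl ⟨i, hi, j, hj, h1, h2⟩
    · exact Or.inr ⟨i, hi, j, hj, j2, hj2, h1, h2⟩
  · rcases hv with ⟨i, hi, j, hj, h1, h2⟩ | ⟨i, hi, j, hj, j2, hj2, h1, h2⟩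
    · exact Or.inl ⟨i, hi, j, hj, ⟨hi.1, hi.2, by omega, by omega, h1⟩,
        ⟨hi.1, hi.2, by omega, by omega, h2⟩⟩
    · exact Or.inr ⟨i, hi, j, hj, j2, hj2, ⟨by omega, by omega, hj.1, hj.2, h1⟩,
        ⟨hi.1, by omega, by omega, by omega, h2⟩⟩

-- ===== VERDICT (by name: the statement is the Claim_ definition above) =====
theorem check_spec : Claim_equal_check := by
  intro gs _ hpre
  unfold Spec_check
  unfold Pre_check at hpre
  cases hb : boardOf gs with
  | none => rw [hb] at hpre; simp at hpre
  | some board =>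
    rw [Bool.eq_iff_iff, checkA_iff gs board hb, checkB_iff gs board hb]
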